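-- pv_equiv track=rewrite | github.com/iTilu/AOIS_LABS | lab2/boolean_analysis.py | _combine_patterns
-- ===== SOURCE A (Python) =====
-- BitPattern = tuple[int | None, ...]
--
-- def _combine_patterns(first_pattern: BitPattern, second_pattern: BitPattern) -> BitPattern | None:
--     mismatch_count = 0
--     combined_values: list[int | None] = []
--
--     for first_bit, second_bit in zip(first_pattern, second_pattern):
--         if first_bit == second_bit:
--             combined_values.append(first_bit)
--             continue
--         if first_bit is None or second_bit is None:
--             return None
--         mismatch_count += 1
--         combined_values.append(None)
--         if mismatch_count > 1:
--             return None
--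
--     if mismatch_count != 1:
--         return None
--     return tuple(combined_values)
-- ===== SOURCE B (Python) =====
-- def _combine_patterns(first_pattern, second_pattern):
--     # Index/slice decomposition: locate the first differing index, then compare the
--     # remaining tails wholesale as slices and splice the result from slices.
--     fs, ss = list(first_pattern), list(second_pattern)
--     n = min(len(fs), len(ss))
--     i = next((k for k in range(n) if fs[k] != ss[k]), None)
--     if i is None:
--         return None
--     if fs[i] is None or ss[i] is None:
--         return None
--     if fs[i + 1:n] != ss[i + 1:n]:
--         return None
--     return tuple(fs[:i]) + (None,) + tuple(fs[i + 1:n])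
-- ===== Notes on version B (the rewrite author's own statement) =====
-- stated objective: alternative
-- what changed: Replaces A's fused single-pass loop (mutable mismatch counter plus element-by-element result building with early returns) by a staged index/slice computation: find the index of the first differing position, compare the remaining tails wholesale as slices, and splice the result from slices around a single None.
import Mathlib
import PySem

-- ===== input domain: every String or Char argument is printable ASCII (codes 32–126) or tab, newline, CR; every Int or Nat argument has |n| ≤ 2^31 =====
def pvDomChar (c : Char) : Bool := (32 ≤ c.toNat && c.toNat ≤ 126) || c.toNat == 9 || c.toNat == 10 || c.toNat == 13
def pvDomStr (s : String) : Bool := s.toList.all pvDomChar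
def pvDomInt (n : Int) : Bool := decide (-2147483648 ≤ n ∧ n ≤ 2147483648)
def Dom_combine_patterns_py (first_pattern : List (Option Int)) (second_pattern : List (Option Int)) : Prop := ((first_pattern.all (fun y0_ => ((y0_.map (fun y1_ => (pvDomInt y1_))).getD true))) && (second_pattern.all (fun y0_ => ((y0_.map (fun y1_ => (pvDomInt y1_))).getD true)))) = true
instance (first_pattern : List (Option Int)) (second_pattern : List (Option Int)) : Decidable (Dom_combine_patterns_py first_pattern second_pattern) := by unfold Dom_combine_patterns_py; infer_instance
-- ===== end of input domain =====

-- B replaces A's fused counting/building loop by an index-of-first-difference search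
-- followed by wholesale slice comparison and slice splicing; objective: alternative.

-- ===== PORT A =====
-- A's loop: state = (mismatch_count, combined_values as reversed accumulator)
def combine_patterns_py_go : List (Option Int × Option Int) → Int → List (Option Int) → Option (List (Option Int))
  | [], cnt, acc => if cnt ≠ 1 then none else some acc.reverse
  | (a, b) :: rest, cnt, acc =>
    if a = b then combine_patterns_py_go rest cnt (a :: acc)
    else if a = none ∨ b = none then none
    else if cnt + 1 > 1 then none
    else combine_patterns_py_go rest (cnt + 1) (none :: acc)

def combine_patterns_py (first_pattern : List (Option Int)) (second_pattern : List (Option Int)) : Option (List (Option Int)) :=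
  combine_patterns_py_go (first_pattern.zip second_pattern) 0 []

-- ===== PORT B =====
-- B's 'next(k for k in range(n) if fs[k] != ss[k], None)': scan k upward; exact because
-- k only indexes positions both lists have
def combine_patterns_py_first_diff : List (Option Int) → List (Option Int) → Option Nat
  | a :: fs, b :: ss => if a = b then (combine_patterns_py_first_diff fs ss).map (· + 1) else some 0
  | _, _ => none

-- slices fs[:i], fs[i+1:n] with 0 ≤ i < n ≤ len ported as take/drop (exact for these
-- nonnegative in-range bounds); fs[i] with the in-range Nat i ported as getElem?
-- (the '| _, _ => none' row is a totality guard only: i returned by the scan is in range)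
def combine_patterns_py_alt (first_pattern : List (Option Int)) (second_pattern : List (Option Int)) : Option (List (Option Int)) :=
  let n := min first_pattern.length second_pattern.length
  match combine_patterns_py_first_diff first_pattern second_pattern with
  | none => none
  | some i =>
    match first_pattern[i]?, second_pattern[i]? with
    | some a, some b =>
      if a = none ∨ b = none then none
      else if (first_pattern.take n).drop (i + 1) ≠ (second_pattern.take n).drop (i + 1) then none
      else some (first_pattern.take i ++ [none] ++ (first_pattern.take n).drop (i + 1))
    | _, _ => none

-- ===== PRECONDITION & SPEC =====
def Spec_combine_patterns_py (first_pattern : List (Option Int)) (second_pattern : List (Option Int)) (out : Option (List (Option Int))) : Prop := out = combine_patterns_py_alt first_pattern second_pattern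
instance (first_pattern : List (Option Int)) (second_pattern : List (Option Int)) (out : Option (List (Option Int))) : Decidable (Spec_combine_patterns_py first_pattern second_pattern out) := by unfold Spec_combine_patterns_py; infer_instance

-- ===== CLAIM (what is proved, stated in full; the proofs are below) =====
def Claim_equal_combine_patterns_py : Prop := ∀ (first_pattern : List (Option Int)) (second_pattern : List (Option Int)), Dom_combine_patterns_py first_pattern second_pattern → Spec_combine_patterns_py first_pattern second_pattern (combine_patterns_py first_pattern second_pattern)

-- ===== LEMMAS AND PROOFS =====

-- proof-side recursive middleman between the two ports
def altRec : List (Option Int) → List (Option Int) → Option (List (Option Int))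
  | [], _ => none
  | _ :: _, [] => none
  | a :: fs, b :: ss =>
    if a = b then (altRec fs ss).map (fun rest => a :: rest)
    else if a = none ∨ b = none then none
    else if (fs.zip ss).all (fun p => p.1 == p.2) then some (none :: (fs.zip ss).map (fun p => p.1))
    else none

-- A's loop after the one allowed mismatch: succeeds iff the remaining pairs all agree
theorem go_one (pairs : List (Option Int × Option Int)) :
    ∀ acc, combine_patterns_py_go pairs 1 acc =
      if pairs.all (fun p => p.1 == p.2) then
        some (acc.reverse ++ pairs.map (fun p => p.1))
      else none := by
  induction pairs with
  | nil => intro acc; simp [combine_patterns_py_go]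
  | cons hd rest ih =>
    intro acc
    obtain ⟨a, b⟩ := hd
    by_cases hab : a = b
    · rw [combine_patterns_py_go, if_pos hab, ih]
      by_cases h : rest.all (fun p => p.1 == p.2) = true
      · simp [hab, h]
      · simp [hab, h]
    · simp [combine_patterns_py_go, hab]

-- A's loop from the initial state equals the middleman (up to the accumulator)
theorem go_zero (f : List (Option Int)) :
    ∀ s acc, combine_patterns_py_go (f.zip s) 0 acc =
      (altRec f s).map (fun r => acc.reverse ++ r) := by
  induction f with
  | nil => intro s acc; simp [combine_patterns_py_go, altRec]
  | cons a fs ih =>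
    intro s acc
    cases s with
    | nil => simp [combine_patterns_py_go, altRec]
    | cons b ss =>
      by_cases hab : a = b
      · rw [List.zip_cons_cons, combine_patterns_py_go, if_pos hab, ih,
            altRec, if_pos hab]
        cases altRec fs ss <;> simp
      · by_cases hn : a = none ∨ b = none
        · simp [combine_patterns_py_go, altRec, hab, hn]
        · rw [List.zip_cons_cons, combine_patterns_py_go, if_neg hab, if_neg hn,
              if_neg (show ¬((0 : Int) + 1 > 1) by norm_num),
              show (0 : Int) + 1 = 1 by norm_num, go_one,
              altRec, if_neg hab, if_neg hn]
          by_cases h : (fs.zip ss).all (fun p => p.1 == p.2) = true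
          · simp [h]
          · simp [h]

theorem zip_map_fst (fs : List (Option Int)) :
    ∀ ss : List (Option Int),
      (fs.zip ss).map (fun p => p.1) = fs.take (min fs.length ss.length) := by
  induction fs with
  | nil => intro ss; simp
  | cons a fs ih =>
    intro ss
    cases ss with
    | nil => simp
    | cons b ss => simp [ih, Nat.add_min_add_right, List.take_succ_cons]

theorem zip_all_eq (fs : List (Option Int)) :
    ∀ ss : List (Option Int),
      ((fs.zip ss).all (fun p => p.1 == p.2) = true) ↔
        fs.take (min fs.length ss.length) = ss.take (min fs.length ss.length) := by
  induction fs with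
  | nil => intro ss; simp
  | cons a fs ih =>
    intro ss
    cases ss with
    | nil => simp
    | cons b ss =>
      simp [ih, Nat.add_min_add_right, List.take_succ_cons]

-- B's staged computation equals the middleman
theorem alt_eq_altRec (f : List (Option Int)) :
    ∀ s, combine_patterns_py_alt f s = altRec f s := by
  induction f with
  | nil => intro s; simp [combine_patterns_py_alt, combine_patterns_py_first_diff, altRec]
  | cons a fs ih =>
    intro s
    cases s with
    | nil => simp [combine_patterns_py_alt, combine_patterns_py_first_diff, altRec]
    | cons b ss =>
      by_cases hab : a = b
      · rw [altRec, if_pos hab, ← ih ss]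
        unfold combine_patterns_py_alt
        rw [combine_patterns_py_first_diff, if_pos hab]
        cases hfd : combine_patterns_py_first_diff fs ss with
        | none => simp
        | some i =>
          simp only [Option.map_some]
          show _ = (match fs[i]?, ss[i]? with
            | some a', some b' =>
              if a' = none ∨ b' = none then none
              else if (fs.take (min fs.length ss.length)).drop (i + 1) ≠ (ss.take (min fs.length ss.length)).drop (i + 1) then none
              else some (fs.take i ++ [none] ++ (fs.take (min fs.length ss.length)).drop (i + 1))
            | _, _ => none).map (fun rest => a :: rest)
          simp only [List.length_cons, Nat.add_min_add_right, List.take_succ_cons,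
            List.getElem?_cons_succ, List.drop_succ_cons, hab]
          cases fs[i]? with
          | none => simp
          | some a' =>
            cases ss[i]? with
            | none => simp
            | some b' =>
              by_cases h1 : a' = none ∨ b' = none
              · simp [h1]
              · by_cases h2 : (fs.take (min fs.length ss.length)).drop (i + 1) = (ss.take (min fs.length ss.length)).drop (i + 1)
                · simp [h1, h2]
                · simp [h1, h2]
      · have hn0 : fs.length ⊓ ss.length + 1 = (a :: fs).length ⊓ (b :: ss).length := by
          simp [Nat.add_min_add_right]
        unfold combine_patterns_py_alt altRec
        rw [combine_patterns_py_first_diff, if_neg hab]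
        simp only [List.getElem?_cons_zero, Nat.zero_add, ← hn0, List.take_succ_cons,
          List.drop_succ_cons, List.drop_zero, if_neg hab]
        by_cases hn : a = none ∨ b = none
        · simp [hn]
        · by_cases h : (fs.zip ss).all (fun p => p.1 == p.2) = true
          · have ht := (zip_all_eq fs ss).mp h
            simp [hn, h, ht, zip_map_fst]
          · have ht : ¬ fs.take (min fs.length ss.length) = ss.take (min fs.length ss.length) := by
              intro hc; exact h ((zip_all_eq fs ss).mpr hc)
            simp [hn, h, ht]

-- ===== VERDICT (by name: the statement is the Claim_ definition above) =====
theorem combine_patterns_py_spec : Claim_equal_combine_patterns_py := by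
  intro f s _
  unfold Spec_combine_patterns_py combine_patterns_py
  rw [go_zero, alt_eq_altRec]
  cases altRec f s <;> simp
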